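-- pv_equiv track=rewrite | github.com/raphaelmansuy/digital_palace | comprehensive_quality_check.py | check_quoted_examples
-- ===== SOURCE A (Python) =====
-- def check_quoted_examples(content: str) -> int:
--     """Count quoted text examples (blockquotes)"""
--     # Count blocks of blockquoted text
--     blockquote_blocks = 0
--     lines = content.split('\n')
--     in_blockquote = False
--
--     for line in lines:
--         line = line.strip()
--         if line.startswith('>'):
--             if not in_blockquote:
--                 blockquote_blocks += 1
--                 in_blockquote = True
--         else:
--             in_blockquote = False
--
--     return blockquote_blocks
-- ===== SOURCE B (Python) =====
-- def check_quoted_examples(content: str) -> int: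
--     """Count quoted text examples (blockquotes)"""
--     # Arithmetic identity: each maximal run of k quoted lines contributes
--     # k quoted lines and k-1 adjacent quoted pairs, so
--     # #blocks = #quoted lines - #adjacent quoted pairs.
--     flags = [line.strip().startswith('>') for line in content.split('\n')]
--     quoted = sum(flags)
--     adjacent = sum(1 for a, b in zip(flags, flags[1:]) if a and b)
--     return quoted - adjacent
-- ===== Notes on version B (the rewrite author's own statement) =====
-- stated objective: alternative
-- what changed: B replaces A's stateful run-detection loop by an arithmetic identity: it counts quoted lines and adjacent quoted pairs separately and returns their difference (#blocks = #quoted - #adjacent pairs), with no in_blockquote state.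
import Mathlib
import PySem

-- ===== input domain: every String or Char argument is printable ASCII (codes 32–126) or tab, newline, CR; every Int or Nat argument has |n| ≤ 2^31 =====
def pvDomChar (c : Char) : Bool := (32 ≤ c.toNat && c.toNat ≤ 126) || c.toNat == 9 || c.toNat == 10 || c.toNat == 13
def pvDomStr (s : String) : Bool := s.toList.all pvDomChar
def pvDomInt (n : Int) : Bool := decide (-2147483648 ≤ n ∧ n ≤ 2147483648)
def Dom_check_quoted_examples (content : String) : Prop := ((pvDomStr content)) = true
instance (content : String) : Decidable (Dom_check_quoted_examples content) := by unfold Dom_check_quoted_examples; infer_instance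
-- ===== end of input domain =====

-- B replaces A's stateful run-detection loop by the arithmetic identity
-- #blocks = #quoted lines - #adjacent quoted pairs. Objective: alternative.

-- ===== PORT A =====
-- A: one pass over the lines with state (blockquote_blocks, in_blockquote)
def check_quoted_examples (content : String) : Int :=
  ((((PySem.Str.split? content "\n").getD []).foldl
      (fun (st : Int × Bool) line =>
        if PySem.Str.startswith (PySem.Str.strip line) ">" then
          if !st.2 then (st.1 + 1, true) else st
        else (st.1, false))
      (0, false))).1

-- ===== PORT B =====
-- B: per-line flags; result = (#true flags) - (#adjacent pairs of true flags)
def check_quoted_examples_alt (content : String) : Int :=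
  let flags := ((PySem.Str.split? content "\n").getD []).map
    (fun line => PySem.Str.startswith (PySem.Str.strip line) ">")
  let quoted : Int := flags.count true
  let adjacent : Int := (flags.zip flags.tail).countP (fun p => p.1 && p.2)
  quoted - adjacent

-- ===== PRECONDITION & SPEC =====
def Spec_check_quoted_examples (content : String) (out : Int) : Prop := out = check_quoted_examples_alt content
instance (content : String) (out : Int) : Decidable (Spec_check_quoted_examples content out) := by unfold Spec_check_quoted_examples; infer_instance

-- ===== CLAIM (what is proved, stated in full; the proofs are below) =====
def Claim_equal_check_quoted_examples : Prop := ∀ (content : String), Dom_check_quoted_examples content → Spec_check_quoted_examples content (check_quoted_examples content)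

-- ===== LEMMAS AND PROOFS =====

-- adjacent true pairs in prev :: flags
def pvAdj (prev : Bool) : List Bool → Int
  | [] => 0
  | b :: rest => (if prev && b then 1 else 0) + pvAdj b rest

lemma foldA_eq (lines : List String) (cnt : Int) (inb : Bool) :
    (lines.foldl
      (fun (st : Int × Bool) line =>
        if PySem.Str.startswith (PySem.Str.strip line) ">" then
          if !st.2 then (st.1 + 1, true) else st
        else (st.1, false))
      (cnt, inb)).1
    = cnt + ((lines.map (fun line => PySem.Str.startswith (PySem.Str.strip line) ">")).count true : Int)
        - pvAdj inb (lines.map (fun line => PySem.Str.startswith (PySem.Str.strip line) ">")) := by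
  induction lines generalizing cnt inb with
  | nil => simp [pvAdj]
  | cons l rest ih =>
    simp only [List.foldl_cons, List.map_cons, pvAdj]
    by_cases h : PySem.Str.startswith (PySem.Str.strip l) ">" = true
    · cases inb <;>
        simp only [h, if_true, Bool.not_false, Bool.not_true, Bool.true_and, Bool.false_and,
          Bool.false_eq_true, if_false, ih, List.count_cons, beq_self_eq_true] <;>
        push_cast <;> omega
    · simp only [Bool.not_eq_true] at h
      cases inb <;>
        simp only [h, Bool.and_false, Bool.false_eq_true, if_false, ih, List.count_cons] <;>
        simp

lemma adj_eq_zip (prev : Bool) (flags : List Bool) :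
    pvAdj prev flags = (((prev :: flags).zip flags).countP (fun p => p.1 && p.2) : Int) := by
  induction flags generalizing prev with
  | nil => simp [pvAdj]
  | cons b rest ih =>
    simp only [pvAdj, List.zip_cons_cons, List.countP_cons, ih]
    by_cases h : (prev && b) = true <;> simp [h] <;> omega

-- ===== VERDICT (by name: the statement is the Claim_ definition above) =====
theorem check_quoted_examples_spec : Claim_equal_check_quoted_examples := by
  intro content _
  unfold Spec_check_quoted_examples check_quoted_examples check_quoted_examples_alt
  rw [foldA_eq]
  cases hf : ((PySem.Str.split? content "\n").getD []).map
      (fun line => PySem.Str.startswith (PySem.Str.strip line) ">") with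
  | nil => simp [pvAdj]
  | cons b rest =>
    simp only [List.tail_cons]
    have h1 : pvAdj false (b :: rest) = pvAdj b rest := by simp [pvAdj]
    rw [← adj_eq_zip, h1, adj_eq_zip]
    ring
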